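-- pv_equiv track=rewrite | github.com/CheungZeeCn/di | libs/datasets/t1_test_dataset_gp.py | get_position_ids
-- ===== SOURCE A (Python) =====
-- def get_position_ids(segment_ids):
--     position_ids = []
--     for i in range(len(segment_ids)):
--         if i == 0:
--             position_ids.append(2)
--         else:
--             if segment_ids[i] == segment_ids[i - 1]:
--                 position_ids.append(position_ids[-1] + 1)
--             else:
--                 position_ids.append(2)
--     return position_ids
-- ===== SOURCE B (Python) =====
-- from itertools import groupby
--
-- def get_position_ids(segment_ids):
--     position_ids = []
--     for _, run in groupby(segment_ids):
--         position_ids.extend(range(2, 2 + sum(1 for _ in run)))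
--     return position_ids
-- ===== Notes on version B (the rewrite author's own statement) =====
-- stated objective: idiomatic
-- what changed: Replaces the per-index loop with its i==0 / equal-to-previous / new-segment branching and last-element increment by an itertools.groupby pass that splits the input into maximal runs and emits range(2, 2+L) for each run.
import Mathlib
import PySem

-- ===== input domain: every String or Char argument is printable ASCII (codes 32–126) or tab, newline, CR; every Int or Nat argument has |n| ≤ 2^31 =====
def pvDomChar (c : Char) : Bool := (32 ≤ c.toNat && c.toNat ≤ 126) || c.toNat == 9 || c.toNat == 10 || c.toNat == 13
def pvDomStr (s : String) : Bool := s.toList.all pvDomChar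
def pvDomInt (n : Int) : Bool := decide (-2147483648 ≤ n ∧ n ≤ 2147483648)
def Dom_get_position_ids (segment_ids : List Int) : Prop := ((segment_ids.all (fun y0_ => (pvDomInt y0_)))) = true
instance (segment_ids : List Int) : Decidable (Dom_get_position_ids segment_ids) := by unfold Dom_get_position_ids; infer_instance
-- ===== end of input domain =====

-- B replaces A's per-index branching loop by a run-based (groupby) generation of ranges; objective: idiomatic.

-- ===== PORT A =====
-- the body of A's for-loop over i in range(len(segment_ids))
def pvAStep (segment_ids : List Int) (acc : List Int) (i : Int) : List Int :=
  if i = 0 then acc ++ [2]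
  else if PySem.List.pyGet? segment_ids i = PySem.List.pyGet? segment_ids (i - 1) then
    acc ++ [(PySem.List.pyGet? acc (-1)).getD 0 + 1]   -- .getD 0 is a totality guard; acc is never empty here
  else acc ++ [2]

def get_position_ids (segment_ids : List Int) : List Int :=
  (PySem.List.pyRange 0 (segment_ids.length : Int) 1).foldl (pvAStep segment_ids) []

-- ===== PORT B =====
-- takeRun v xs = (length of the maximal prefix of xs equal to v, the remainder)
def pvTakeRun (v : Int) : List Int → Nat × List Int
  | [] => (0, [])
  | x :: xs => if x = v then let r := pvTakeRun v xs; (r.1 + 1, r.2) else (0, x :: xs)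

theorem pvTakeRun_rest_le (v : Int) (xs : List Int) : (pvTakeRun v xs).2.length ≤ xs.length := by
  induction xs with
  | nil => simp [pvTakeRun]
  | cons x xs ih =>
    simp only [pvTakeRun]
    split
    · exact Nat.le_trans ih (Nat.le_succ _)
    · exact Nat.le_refl _

-- for each maximal run x::⟨n more⟩, emit range(2, 2 + (n+1))
def get_position_ids_alt (segment_ids : List Int) : List Int :=
  match segment_ids with
  | [] => []
  | x :: xs =>
    let r := pvTakeRun x xs
    PySem.List.pyRange 2 (2 + ((r.1 : Int) + 1)) 1 ++ get_position_ids_alt r.2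
termination_by segment_ids.length
decreasing_by
  have := pvTakeRun_rest_le x xs
  simp only [List.length_cons]; omega

-- ===== PRECONDITION & SPEC =====
def Spec_get_position_ids (segment_ids : List Int) (out : List Int) : Prop := out = get_position_ids_alt segment_ids
instance (segment_ids : List Int) (out : List Int) : Decidable (Spec_get_position_ids segment_ids out) := by unfold Spec_get_position_ids; infer_instance

-- ===== CLAIM (what is proved, stated in full; the proofs are below) =====
def Claim_equal_get_position_ids : Prop := ∀ (segment_ids : List Int), Dom_get_position_ids segment_ids → Spec_get_position_ids segment_ids (get_position_ids segment_ids)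

-- ===== LEMMAS AND PROOFS =====

-- intermediate structural recursion: prev value, next position
def pvGa : Int → Int → List Int → List Int
  | _, _, [] => []
  | v, p, x :: xs => if x = v then p :: pvGa x (p + 1) xs else 2 :: pvGa x 3 xs

-- A's loop from index i (1 ≤ i) onwards equals pvGa, given the previous element and acc's last
theorem pvA_loop_eq_ga (s : List Int) (i : Nat) (hi : 1 ≤ i) (acc : List Int) (q : Int)
    (hlast : acc.getLast? = some q) :
    ((PySem.List.pyRange (i : Int) (s.length : Int) 1).foldl (pvAStep s) acc)
      = acc ++ pvGa (s.getD (i-1) 0) (q + 1) (s.drop i) := by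
  by_cases h : i < s.length
  · rw [PySem.List.pyRange_one_cons (by exact_mod_cast h)]
    simp only [List.foldl_cons]
    have hi0 : ((i : Int)) ≠ 0 := by omega
    have hstep : pvAStep s acc (i : Int)
        = acc ++ [if s.getD i 0 = s.getD (i-1) 0 then q + 1 else 2] := by
      have h1 : PySem.List.pyGet? s (i : Int) = some (s.getD i 0) := by
        simp [PySem.List.pyGet?_natCast, List.getD_eq_getElem?_getD, List.getElem?_eq_getElem h]
      have hcast : ((i : Int)) - 1 = ((i - 1 : Nat) : Int) := by omega
      have hlt : i - 1 < s.length := by omega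
      have h2 : PySem.List.pyGet? s ((i : Int) - 1) = some (s.getD (i-1) 0) := by
        rw [hcast]
        simp [PySem.List.pyGet?_natCast, List.getD_eq_getElem?_getD, List.getElem?_eq_getElem hlt]
      have h3 : PySem.List.pyGet? acc (-1) = some q := by
        rw [PySem.List.pyGet?_neg_one, hlast]
      simp only [pvAStep, if_neg hi0, h1, h2, h3, Option.getD_some, Option.some.injEq]
      split_ifs with hv
      · rfl
      · rfl
    rw [hstep]
    have hdrop : s.drop i = s.getD i 0 :: s.drop (i+1) := by
      rw [List.drop_eq_getElem_cons h]
      congr 1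
      simp [List.getD_eq_getElem?_getD, List.getElem?_eq_getElem h]
    have hrec := pvA_loop_eq_ga s (i+1) (by omega)
      (acc ++ [if s.getD i 0 = s.getD (i-1) 0 then q + 1 else 2])
      (if s.getD i 0 = s.getD (i-1) 0 then q + 1 else 2) (by simp)
    have hcast2 : ((i : Int)) + 1 = ((i + 1 : Nat) : Int) := by omega
    rw [hcast2, hrec]
    simp only [Nat.add_sub_cancel, hdrop, pvGa, List.append_assoc, List.cons_append,
      List.nil_append]
    split_ifs with hv <;> simp
  · rw [PySem.List.pyRange_one_eq_nil (by exact_mod_cast Nat.le_of_not_lt h)]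
    rw [List.drop_eq_nil_of_le (Nat.le_of_not_lt h)]
    simp [pvGa]
termination_by s.length - i

theorem pvGa_eq_alt (xs : List Int) (x : Int) (p : Int) :
    pvGa x p xs = PySem.List.pyRange p (p + ((pvTakeRun x xs).1 : Int)) 1
      ++ get_position_ids_alt (pvTakeRun x xs).2 := by
  induction xs generalizing x p with
  | nil => simp [pvGa, pvTakeRun, get_position_ids_alt, PySem.List.pyRange_one_eq_nil]
  | cons y ys ih =>
    by_cases hv : y = x
    · simp only [pvGa, pvTakeRun, if_pos hv]
      rw [ih y (p+1)]
      subst hv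
      have he : p + (((pvTakeRun y ys).1 + 1 : Nat) : Int) = p + 1 + ((pvTakeRun y ys).1 : Int) := by
        push_cast; omega
      conv_rhs => rw [he, PySem.List.pyRange_one_cons (show p < p + 1 + ((pvTakeRun y ys).1 : Int) by omega)]
      simp
    · simp only [pvGa, pvTakeRun, if_neg hv, Nat.cast_zero, add_zero]
      rw [PySem.List.pyRange_one_eq_nil (le_refl p), List.nil_append]
      conv_rhs => rw [get_position_ids_alt]
      rw [ih y 3]
      have he : (2 : Int) + (((pvTakeRun y ys).1 : Int) + 1) = 3 + ((pvTakeRun y ys).1 : Int) := by omega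
      conv_rhs => rw [he, PySem.List.pyRange_one_cons (show (2:Int) < 3 + ((pvTakeRun y ys).1 : Int) by omega)]
      simp

-- ===== VERDICT (by name: the statement is the Claim_ definition above) =====
theorem get_position_ids_spec : Claim_equal_get_position_ids := by
  intro s _
  unfold Spec_get_position_ids get_position_ids
  match s with
  | [] => simp [get_position_ids_alt, PySem.List.pyRange_one_eq_nil]
  | x :: xs =>
    have hlen : (0 : Int) < ((x :: xs).length : Int) := by simp
    rw [PySem.List.pyRange_one_cons hlen]
    simp only [List.foldl_cons]
    have hstep0 : pvAStep (x :: xs) [] 0 = [2] := by simp [pvAStep]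
    rw [hstep0]
    have hloop := pvA_loop_eq_ga (x :: xs) 1 (le_refl 1) [2] 2 (by simp)
    norm_num at hloop ⊢
    rw [hloop, pvGa_eq_alt]
    conv_rhs => rw [get_position_ids_alt]
    have he : (2 : Int) + (((pvTakeRun x xs).1 : Int) + 1) = 3 + ((pvTakeRun x xs).1 : Int) := by omega
    conv_rhs => rw [he, PySem.List.pyRange_one_cons (show (2:Int) < 3 + ((pvTakeRun x xs).1 : Int) by omega)]
    simp
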